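-- pv_equiv track=rewrite | github.com/ut-osa/ryoan | naclports/examples/BASELINE/my_lasagne.py | autocrop_array_shapes
-- ===== SOURCE A (Python) =====
-- def autocrop_array_shapes(input_shapes, cropping):
--     if cropping is None:
--         return input_shapes
--     else:
--         # Check for consistent number of dimensions
--         ndim = len(input_shapes[0])
--         if not all(len(sh) == ndim for sh in input_shapes):
--             raise ValueError("Not all inputs are of the same "
--                              "dimensionality. Got {0} inputs of "
--                              "dimensionalities {1}.".format(
--                                 len(input_shapes),
--                                 [len(sh) for sh in input_shapes]))
--
--         result = []
--
--         # If there are more dimensions than cropping entries, pad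
--         # the cropping
--         cropping = list(cropping)
--         if ndim > len(cropping):
--             cropping = list(cropping) + \
--                          [None] * (ndim - len(cropping))
--
--         for sh, cr in zip(zip(*input_shapes), cropping):
--             if cr is None:
--                 result.append(sh)
--             elif cr in {'lower', 'center', 'upper'}:
--                 result.append([min(sh)] * len(sh))
--             else:
--                 raise ValueError('Unknown crop mode \'{0}\''.format(cr))
--         return [tuple(sh) for sh in zip(*result)]
-- ===== SOURCE B (Python) =====
-- def autocrop_array_shapes(input_shapes, cropping):
--     if cropping is None:
--         return input_shapes
--     ndim = len(input_shapes[0])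
--     if any(len(sh) != ndim for sh in input_shapes):
--         raise ValueError("Not all inputs are of the same "
--                          "dimensionality. Got {0} inputs of "
--                          "dimensionalities {1}.".format(
--                             len(input_shapes),
--                             [len(sh) for sh in input_shapes]))
--     crops = list(cropping)[:ndim]
--     crops += [None] * (ndim - len(crops))
--     mins = []
--     for j in range(ndim):
--         cr = crops[j]
--         if cr is None:
--             mins.append(None)
--         elif cr in ('lower', 'center', 'upper'):
--             mins.append(min(sh[j] for sh in input_shapes))
--         else:
--             raise ValueError('Unknown crop mode \'{0}\''.format(cr))
--     return [tuple(sh[j] if mins[j] is None else mins[j] for j in range(ndim))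
--             for sh in input_shapes]
-- ===== Notes on version B (the rewrite author's own statement) =====
-- stated objective: simpler
-- what changed: B drops A's zip(*...) transpose / per-column loop / transpose-back pipeline and instead precomputes a per-dimension min table, then builds each output tuple directly per input shape and dimension.
-- intended difference: On 0-dimensional inputs (cropping given, input_shapes nonempty, first shape empty) A returns [] losing the number of inputs, while B returns one empty shape per input, the intended shape-preserving answer. — e.g. on autocrop_array_shapes([[], []], some []): A returns [], B returns [[], []]
import Mathlib
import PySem

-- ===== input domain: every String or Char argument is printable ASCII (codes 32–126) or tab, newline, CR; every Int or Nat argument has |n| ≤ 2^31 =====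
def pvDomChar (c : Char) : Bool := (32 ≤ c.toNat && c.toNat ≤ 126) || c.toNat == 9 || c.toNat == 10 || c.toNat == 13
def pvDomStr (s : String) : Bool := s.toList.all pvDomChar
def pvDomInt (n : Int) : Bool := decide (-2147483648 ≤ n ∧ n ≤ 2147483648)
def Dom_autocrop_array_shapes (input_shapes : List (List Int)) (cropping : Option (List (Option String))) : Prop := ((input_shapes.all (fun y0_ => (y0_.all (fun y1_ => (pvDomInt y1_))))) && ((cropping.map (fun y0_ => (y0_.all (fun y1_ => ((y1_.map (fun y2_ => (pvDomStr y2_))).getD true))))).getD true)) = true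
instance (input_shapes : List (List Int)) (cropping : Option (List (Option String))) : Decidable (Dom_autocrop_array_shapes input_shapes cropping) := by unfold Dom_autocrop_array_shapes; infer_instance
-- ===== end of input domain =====

-- B replaces A's transpose / per-column loop / transpose-back with a precomputed per-dimension
-- min table and a direct per-input, per-dimension construction (simpler decomposition, same cost).

-- ===== PORT A =====
-- Python min over a nonempty tuple (exact for nonempty lists; empty case unreachable inside Pre_)
def pvMin : List Int → Int
  | [] => 0
  | x :: xs => xs.foldl min x

-- hand port of zip(*xss): truncates to the shortest row; zip(*[]) = []  (exact)
def pvZipGo : List Int → List (List Int) → List (List Int)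
  | [], _ => []
  | x :: xs, rest =>
    if rest.all (fun l => !l.isEmpty) then
      (x :: rest.map List.headI) :: pvZipGo xs (rest.map List.tail)
    else []

def pvZipN : List (List Int) → List (List Int)
  | [] => []
  | h :: t => pvZipGo h t

-- the body of A's for-loop; raise ValueError('Unknown crop mode …') is modeled as none
def pvStepA (p : List Int × Option String) : Option (List Int) :=
  match p.2 with
  | none => some p.1
  | some cr =>
    if cr = "lower" ∨ cr = "center" ∨ cr = "upper" then
      some (List.replicate p.1.length (pvMin p.1))
    else none

def autocrop_array_shapes (input_shapes : List (List Int)) (cropping : Option (List (Option String))) : List (List Int) :=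
  match cropping with
  | none => input_shapes
  | some cl =>
    let ndim := input_shapes.headI.length   -- input_shapes[0]: IndexError on [] lies outside Pre_
    if ¬ (input_shapes.all (fun sh => sh.length == ndim)) then []  -- raise ValueError (outside Pre_)
    else
      let cropping2 := if ndim > cl.length then cl ++ List.replicate (ndim - cl.length) none else cl
      match ((pvZipN input_shapes).zip cropping2).foldl
          (fun acc p => acc.bind fun r => (pvStepA p).map fun v => r ++ [v]) (some []) with
      | none => []      -- raise ValueError 'Unknown crop mode' (outside Pre_)
      | some result => pvZipN result

-- ===== PORT B =====
-- the body of B's for-j loop; raise ValueError is modeled as none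
def pvStepB (input_shapes : List (List Int)) (crops : List (Option String)) (j : Nat) : Option (Option Int) :=
  match crops.getD j none with
  | none => some none
  | some cr =>
    if cr = "lower" ∨ cr = "center" ∨ cr = "upper" then
      some (some (pvMin (input_shapes.map fun sh => sh.getD j 0)))
    else none

def autocrop_array_shapes_alt (input_shapes : List (List Int)) (cropping : Option (List (Option String))) : List (List Int) :=
  match cropping with
  | none => input_shapes
  | some cl =>
    let ndim := input_shapes.headI.length   -- input_shapes[0]
    if input_shapes.any (fun sh => sh.length != ndim) then []  -- raise ValueError (outside Pre_)
    else
      let crops := cl.take ndim ++ List.replicate (ndim - (cl.take ndim).length) none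
      match (List.range ndim).foldl
          (fun acc j => acc.bind fun r => (pvStepB input_shapes crops j).map fun v => r ++ [v]) (some []) with
      | none => []      -- raise ValueError 'Unknown crop mode' (outside Pre_)
      | some mins =>
        input_shapes.map fun sh =>
          (List.range ndim).map fun j =>
            match mins.getD j none with
            | none => sh.getD j 0   -- index j < len(sh) inside Pre_
            | some v => v

-- ===== PRECONDITION & SPEC =====
def pvValidMode (o : Option String) : Bool :=
  o == none || o == some "lower" || o == some "center" || o == some "upper"

-- Pre_ excludes exactly the inputs where A raises: empty input_shapes with cropping given
-- (IndexError), inconsistent dimensionalities (ValueError), and an unknown crop mode within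
-- the first ndim cropping entries (ValueError).
def Pre_autocrop_array_shapes (input_shapes : List (List Int)) (cropping : Option (List (Option String))) : Prop :=
  match cropping with
  | none => True
  | some cl =>
    input_shapes ≠ [] ∧
    (∀ sh ∈ input_shapes, sh.length = input_shapes.headI.length) ∧
    (∀ j < min input_shapes.headI.length cl.length, pvValidMode (cl.getD j none) = true)

instance (input_shapes : List (List Int)) (cropping : Option (List (Option String))) : Decidable (Pre_autocrop_array_shapes input_shapes cropping) := by
  unfold Pre_autocrop_array_shapes; cases cropping <;> infer_instance

def pvWitness_autocrop_array_shapes : List (List Int) × Option (List (Option String)) :=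
  ([[3, 4], [2, 5]], some [some "lower"])

-- On 0-dimensional shapes (cropping given, input_shapes nonempty, first shape empty) A returns []
-- losing the number of inputs, while B returns one empty shape per input, which is the intended
-- shape-preserving answer.
def D_autocrop_array_shapes (input_shapes : List (List Int)) (cropping : Option (List (Option String))) : Prop :=
  cropping ≠ none ∧ input_shapes ≠ [] ∧ input_shapes.headI = []

instance (input_shapes : List (List Int)) (cropping : Option (List (Option String))) : Decidable (D_autocrop_array_shapes input_shapes cropping) := by
  unfold D_autocrop_array_shapes; infer_instance

def Spec_autocrop_array_shapes (input_shapes : List (List Int)) (cropping : Option (List (Option String))) (out : List (List Int)) : Prop :=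
  ¬ D_autocrop_array_shapes input_shapes cropping → out = autocrop_array_shapes_alt input_shapes cropping
instance (input_shapes : List (List Int)) (cropping : Option (List (Option String))) (out : List (List Int)) : Decidable (Spec_autocrop_array_shapes input_shapes cropping out) := by unfold Spec_autocrop_array_shapes; infer_instance

def pvDiffWitness_autocrop_array_shapes : List (List Int) × Option (List (Option String)) :=
  ([[], []], some [])

def pvDiffWitnessOut_autocrop_array_shapes : (List (List Int)) × (List (List Int)) :=
  ([], [[], []])

-- ===== CLAIM (what is proved, stated in full; the proofs are below) =====
def Claim_unchanged_autocrop_array_shapes : Prop := ∀ (input_shapes : List (List Int)) (cropping : Option (List (Option String))), Dom_autocrop_array_shapes input_shapes cropping → Pre_autocrop_array_shapes input_shapes cropping → Spec_autocrop_array_shapes input_shapes cropping (autocrop_array_shapes input_shapes cropping)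
def Claim_changed_autocrop_array_shapes : Prop := Dom_autocrop_array_shapes (pvDiffWitness_autocrop_array_shapes.1) (pvDiffWitness_autocrop_array_shapes.2) ∧ Pre_autocrop_array_shapes (pvDiffWitness_autocrop_array_shapes.1) (pvDiffWitness_autocrop_array_shapes.2) ∧ D_autocrop_array_shapes (pvDiffWitness_autocrop_array_shapes.1) (pvDiffWitness_autocrop_array_shapes.2) ∧ autocrop_array_shapes (pvDiffWitness_autocrop_array_shapes.1) (pvDiffWitness_autocrop_array_shapes.2) = pvDiffWitnessOut_autocrop_array_shapes.1 ∧ autocrop_array_shapes_alt (pvDiffWitness_autocrop_array_shapes.1) (pvDiffWitness_autocrop_array_shapes.2) = pvDiffWitnessOut_autocrop_array_shapes.2 ∧ pvDiffWitnessOut_autocrop_array_shapes.1 ≠ pvDiffWitnessOut_autocrop_array_shapes.2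
def Claim_exact_autocrop_array_shapes : Prop := ∀ (input_shapes : List (List Int)) (cropping : Option (List (Option String))), Dom_autocrop_array_shapes input_shapes cropping → Pre_autocrop_array_shapes input_shapes cropping → D_autocrop_array_shapes input_shapes cropping → autocrop_array_shapes input_shapes cropping ≠ autocrop_array_shapes_alt input_shapes cropping

-- ===== LEMMAS AND PROOFS =====

-- any list is the range-map of its getD
theorem pv_eq_range_map {α : Type} (d : α) (l : List α) :
    l = (List.range l.length).map (fun j => l.getD j d) := by
  apply List.ext_getElem (by simp)
  intro i h1 h2
  simp [List.getD_eq_getElem?_getD, List.getElem?_eq_getElem h1]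

theorem pv_getD_range_map {α : Type} (f : Nat → α) (d : α) {j n : Nat} (h : j < n) :
    ((List.range n).map f).getD j d = f j := by
  simp [List.getD_eq_getElem?_getD, h]

theorem pv_getD_map {α β : Type} (f : α → β) (d : β) (d' : α) (l : List α) {i : Nat}
    (h : i < l.length) : (l.map f).getD i d = f (l.getD i d') := by
  simp [List.getD_eq_getElem?_getD, h]

theorem pvZipGo_eq (h : List Int) : ∀ (t : List (List Int)), (∀ r ∈ t, r.length = h.length) →
    pvZipGo h t = (List.range h.length).map (fun j => (h :: t).map (fun r => r.getD j 0)) := by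
  induction h with
  | nil => intro t ht; simp [pvZipGo]
  | cons x xs ih =>
    intro t ht
    have hne : t.all (fun l => !l.isEmpty) = true := by
      rw [List.all_eq_true]; intro r hr
      have := ht r hr
      cases r with
      | nil => simp at this
      | cons a b => simp
    rw [pvZipGo, if_pos hne, List.length_cons, List.range_succ_eq_map]
    have ih' := ih (t.map List.tail) (by
      intro r hr
      obtain ⟨r', hr', rfl⟩ := List.mem_map.mp hr
      have hl := ht r' hr'
      cases r' with
      | nil => simp at hl
      | cons a b => simp at hl ⊢; omega)
    rw [ih', List.map_cons, List.map_map]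
    congr 1
    · simp only [List.getD_cons_zero, List.map_cons]
      congr 1
      apply List.map_congr_left
      intro r hr
      have := ht r hr
      cases r with
      | nil => simp at this
      | cons a b => simp [List.headI]
    · apply List.map_congr_left
      intro j hj
      simp only [Function.comp_apply, List.map_cons, List.getD_cons_succ, List.map_map]
      congr 1
      apply List.map_congr_left
      intro r hr
      cases r <;> simp

theorem pvZipN_rect {xs : List (List Int)} {n : Nat} (hne : xs ≠ [])
    (hr : ∀ r ∈ xs, r.length = n) :
    pvZipN xs = (List.range n).map (fun j => xs.map (fun r => r.getD j 0)) := by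
  cases xs with
  | nil => exact absurd rfl hne
  | cons h t =>
    have hh : h.length = n := hr h (by simp)
    rw [pvZipN, pvZipGo_eq h t (by intro r hrr; rw [hr r (by simp [hrr]), hh]), hh]

theorem pv_foldl_opt {α β : Type} (g : α → Option β) (f : α → β) :
    ∀ (l : List α) (init : List β), (∀ a ∈ l, g a = some (f a)) →
    l.foldl (fun acc a => acc.bind fun r => (g a).map fun v => r ++ [v]) (some init)
      = some (init ++ l.map f)
  | [], init, _ => by simp
  | a :: l, init, h => by
    have ha := h a (by simp)
    simp only [List.foldl_cons, ha, Option.bind_some, Option.map_some]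
    rw [pv_foldl_opt g f l (init ++ [f a]) (fun x hx => h x (by simp [hx]))]
    simp

theorem pv_zip_truncate {α β : Type} : ∀ (l1 : List α) (l2 : List β),
    l1.zip l2 = l1.zip (l2.take l1.length)
  | [], l2 => by simp
  | a :: l1, [] => by simp
  | a :: l1, b :: l2 => by simp [List.zip_cons_cons, pv_zip_truncate l1 l2]

-- ===== VERDICT (by name: the statement is the Claim_ definition above) =====
theorem autocrop_array_shapes_spec : Claim_unchanged_autocrop_array_shapes := by
  intro input_shapes cropping _ hpre hnd
  cases cropping with
  | none => rfl
  | some cl =>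
    obtain ⟨hne, hrect, hcrop⟩ := hpre
    simp only [autocrop_array_shapes, autocrop_array_shapes_alt]
    set n := input_shapes.headI.length with hn_def
    set m := input_shapes.length with hm_def
    have hm : 0 < m := List.length_pos_iff.mpr hne
    have hn : 0 < n := by
      rcases Nat.eq_zero_or_pos n with h0 | h; swap; · exact h
      exact absurd ⟨by simp, hne, List.length_eq_zero_iff.mp h0⟩ hnd
    have hifA : ¬ ¬ (input_shapes.all fun sh => sh.length == n) = true := by
      simp only [not_not, List.all_eq_true]
      intro sh hsh; simpa using hrect sh hsh
    have hifB : ¬ (input_shapes.any fun sh => sh.length != n) = true := by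
      simp only [List.any_eq_true, not_exists]
      intro sh h; rcases h with ⟨hsh, hbad⟩
      simp [hrect sh hsh] at hbad
    rw [if_neg hifA, if_neg hifB]
    -- notation
    set colFn : Nat → List Int := fun j => input_shapes.map (fun r => r.getD j 0) with hcolFn
    set crops : List (Option String) :=
      cl.take n ++ List.replicate (n - (cl.take n).length) none with hcrops
    have hcropslen : crops.length = n := by
      simp only [hcrops, List.length_append, List.length_take, List.length_replicate]; omega
    set cropAt : Nat → Option String := fun j => crops.getD j none with hcropAt
    -- validity of the first n (padded) cropping entries
    have hvalid : ∀ j < n, pvValidMode (cropAt j) = true := by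
      intro j hj
      by_cases hjc : j < cl.length
      · have : cropAt j = cl.getD j none := by
          simp only [hcropAt, hcrops]
          rw [List.getD_append _ _ _ _ (by simp [List.length_take]; omega)]
          simp [List.getD_eq_getElem?_getD, hj]
        rw [this]; exact hcrop j (by omega)
      · have : cropAt j = none := by
          simp only [hcropAt, hcrops, List.getD_eq_getElem?_getD]
          rw [List.getElem?_append_right (by simp [List.length_take]; omega)]
          simp only [List.getElem?_replicate]
          split <;> rfl
        rw [this]; rfl
    -- the A-side zipped list as a map over range n
    have hZ : pvZipN input_shapes = (List.range n).map colFn :=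
      pvZipN_rect hne hrect
    have hcrops_map : crops = (List.range n).map cropAt := by
      conv_lhs => rw [pv_eq_range_map none crops, hcropslen]
    have htrunc :
        (if n > cl.length then cl ++ List.replicate (n - cl.length) none else cl).take n
          = crops := by
      simp only [hcrops]
      split_ifs with h
      · have h1 : List.take n cl = cl := List.take_of_length_le (by omega)
        rw [h1, List.take_of_length_le (by simp; omega)]
      · have h0 : n - (List.take n cl).length = 0 := by simp [List.length_take]; omega
        simp
        omega
    have hzip :
        (pvZipN input_shapes).zip
            (if n > cl.length then cl ++ List.replicate (n - cl.length) none else cl)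
          = (List.range n).map (fun j => (colFn j, cropAt j)) := by
      rw [pv_zip_truncate, hZ]
      have hlen : ((List.range n).map colFn).length = n := by simp
      rw [hlen, htrunc, hcrops_map, List.zip_map']
    -- evaluate A's loop
    set fA : (List Int × Option String) → List Int := fun p =>
      match p.2 with
      | none => p.1
      | some _ => List.replicate p.1.length (pvMin p.1) with hfA
    have hfoldA :
        List.foldl (fun acc p => acc.bind fun r => Option.map (fun v => r ++ [v]) (pvStepA p)) (some [])
            ((pvZipN input_shapes).zip
              (if n > cl.length then cl ++ List.replicate (n - cl.length) none else cl))
          = some ((List.range n).map (fun j => fA (colFn j, cropAt j))) := by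
      rw [hzip, pv_foldl_opt pvStepA fA]
      · simp
      · intro p hp
        obtain ⟨j, hj, rfl⟩ := List.mem_map.mp hp
        rw [List.mem_range] at hj
        rcases hc : cropAt j with _ | cr
        · simp [pvStepA, hfA]
        · have hv := hvalid j hj
          rw [hc] at hv
          simp only [pvValidMode] at hv
          have : cr = "lower" ∨ cr = "center" ∨ cr = "upper" := by
            rcases Bool.or_eq_true_iff.mp hv with h | h
            · rcases Bool.or_eq_true_iff.mp h with h' | h'
              · rcases Bool.or_eq_true_iff.mp h' with h'' | h''
                · simp at h''
                · left; simpa using h''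
              · right; left; simpa using h'
            · right; right; simpa using h
          simp [pvStepA, hfA, if_pos this]
    rw [hfoldA]
    -- evaluate B's loop
    set fB : Nat → Option Int := fun j =>
      match cropAt j with
      | none => none
      | some _ => some (pvMin (colFn j)) with hfB
    have hfoldB :
        List.foldl (fun acc j => acc.bind fun r =>
              Option.map (fun v => r ++ [v]) (pvStepB input_shapes crops j)) (some [])
            (List.range n)
          = some ((List.range n).map fB) := by
      rw [pv_foldl_opt (pvStepB input_shapes crops) fB]
      · simp
      · intro j hj
        rw [List.mem_range] at hj
        rcases hc : cropAt j with _ | cr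
        · simp only [pvStepB, hfB]
          rw [show crops.getD j none = cropAt j from rfl, hc]
        · have hv := hvalid j hj
          rw [hc] at hv
          simp only [pvValidMode] at hv
          have : cr = "lower" ∨ cr = "center" ∨ cr = "upper" := by
            rcases Bool.or_eq_true_iff.mp hv with h | h
            · rcases Bool.or_eq_true_iff.mp h with h' | h'
              · rcases Bool.or_eq_true_iff.mp h' with h'' | h''
                · simp at h''
                · left; simpa using h''
              · right; left; simpa using h'
            · right; right; simpa using h
          simp only [pvStepB, hfB]
          rw [show crops.getD j none = cropAt j from rfl, hc]
          simp [if_pos this, hcolFn]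
    rw [hfoldB]
    show pvZipN ((List.range n).map (fun j => fA (colFn j, cropAt j)))
        = input_shapes.map (fun sh => (List.range n).map (fun j =>
            match ((List.range n).map fB).getD j none with
            | none => sh.getD j 0
            | some v => v))
    -- transpose back A's result
    have hrows : ∀ row ∈ (List.range n).map (fun j => fA (colFn j, cropAt j)), row.length = m := by
      intro row hrow
      obtain ⟨j, hj, rfl⟩ := List.mem_map.mp hrow
      rcases hc : cropAt j with _ | cr <;> simp [hfA, hcolFn, hm_def]
    have hres_ne : (List.range n).map (fun j => fA (colFn j, cropAt j)) ≠ [] := by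
      simp [List.map_eq_nil_iff, List.range_eq_nil]; omega
    rw [pvZipN_rect hres_ne hrows]
    -- direct per-input view of B's output
    conv_rhs => rw [pv_eq_range_map ([] : List Int) input_shapes, ← hm_def]
    rw [List.map_map]
    apply List.map_congr_left
    intro i hi
    rw [List.mem_range] at hi
    simp only [Function.comp_apply, List.map_map]
    apply List.map_congr_left
    intro j hj
    rw [List.mem_range] at hj
    simp only [Function.comp_apply]
    rw [pv_getD_range_map fB none hj]
    rcases hc : cropAt j with _ | cr
    · simp only [hfA, hfB, hc]
      exact pv_getD_map (fun r => r.getD j 0) 0 [] input_shapes hi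
    · simp only [hfA, hfB, hc]
      have hcl : (colFn j).length = m := by simp [hcolFn, hm_def]
      rw [List.getD_eq_getElem _ _ (by rw [List.length_replicate, hcl]; exact hi)]
      simp

theorem autocrop_array_shapes_changed : Claim_changed_autocrop_array_shapes := by
  unfold Claim_changed_autocrop_array_shapes; decide

theorem autocrop_array_shapes_tight : Claim_exact_autocrop_array_shapes := by
  intro input_shapes cropping _ hpre hD
  obtain ⟨h1, h2, h3⟩ := hD
  cases cropping with
  | none => exact absurd rfl h1
  | some cl =>
    obtain ⟨hne, hrect, hcrop⟩ := hpre
    cases input_shapes with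
    | nil => exact absurd rfl h2
    | cons h t =>
      have hh : h = [] := by simpa using h3
      subst hh
      intro heq
      -- A returns [], B returns one empty row per input shape
      have hA : autocrop_array_shapes ([] :: t) (some cl) = [] := by
        simp only [autocrop_array_shapes]
        have hall : ¬ ¬ ((([] : List Int) :: t).all fun sh => sh.length == ([] :: t).headI.length) = true := by
          simp only [not_not, List.all_eq_true]
          intro sh hsh; simpa using hrect sh hsh
        rw [if_neg hall]
        rfl
      have hB : autocrop_array_shapes_alt ([] :: t) (some cl)
          = (([] : List Int) :: t).map (fun _ => []) := by
        simp only [autocrop_array_shapes_alt]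
        have hany : ¬ ((([] : List Int) :: t).any fun sh => sh.length != ([] :: t).headI.length) = true := by
          simp only [List.any_eq_true, not_exists]
          intro sh hx; rcases hx with ⟨hsh, hbad⟩
          simp [hrect sh hsh] at hbad
        rw [if_neg hany]
        rfl
      rw [hA, hB] at heq
      simp at heq
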